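-- pv_equiv track=rewrite | github.com/samschiffer/python-playground | reverseNum.py | reverse
-- ===== SOURCE A (Python) =====
-- def reverse(x):
--     """
--     :type x: int
--     :rtype: int
--     """
--     negative = x < 0
--     x = abs(x)
--     y = 0
--     while x > 0:
--         remainder = x % 10
--         y = y * 10 + remainder
--         x = x // 10
--     y = y if not negative else -y
--     return 0 if y > (2 ** 31 - 1) or y < (-2 ** 31) else y
-- ===== SOURCE B (Python) =====
-- def reverse(x):
--     """
--     :type x: int
--     :rtype: int
--     """
--     s = str(abs(x))[::-1]
--     y = 0
--     for ch in s:
--         y = y * 10 + (ord(ch) - 48)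
--     if x < 0:
--         y = -y
--     return 0 if y > 2 ** 31 - 1 or y < -2 ** 31 else y
-- ===== Notes on version B (the rewrite author's own statement) =====
-- stated objective: alternative
-- what changed: The div/mod Horner while-loop over the integer is replaced by converting abs(x) to its decimal string, reversing the string with a slice, and folding the reversed characters back into a number via ord, keeping the identical sign handling and int-overflow clamp.
import Mathlib
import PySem

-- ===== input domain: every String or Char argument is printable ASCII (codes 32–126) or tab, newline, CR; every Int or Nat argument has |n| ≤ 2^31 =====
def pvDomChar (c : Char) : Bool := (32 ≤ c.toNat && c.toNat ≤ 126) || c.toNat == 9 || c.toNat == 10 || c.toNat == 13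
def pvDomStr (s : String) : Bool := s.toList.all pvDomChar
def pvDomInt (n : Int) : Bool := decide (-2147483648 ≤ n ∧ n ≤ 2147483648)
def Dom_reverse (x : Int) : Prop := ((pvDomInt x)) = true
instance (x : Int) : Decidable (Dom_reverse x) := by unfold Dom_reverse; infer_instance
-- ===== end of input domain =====

-- B reverses the digits via str(abs(x))[::-1] and a character fold instead of A's div/mod loop; same sign handling and int-overflow clamp.

-- ===== PORT A =====
-- the 'while x > 0' loop of A, state (x, y)
def reverseLoopA (x y : Int) : Int :=
  if h : x > 0 then
    reverseLoopA (PySem.Int.floordiv x 10) (y * 10 + PySem.Int.mod x 10)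
  else y
termination_by x.toNat
decreasing_by
  have h10 : PySem.Int.floordiv x 10 = x / 10 := PySem.Int.floordiv_eq_ediv_of_pos (by omega)
  rw [h10]; omega

def reverse (x : Int) : Int :=
  let negative : Bool := decide (x < 0)
  let x1 := |x|
  let y := reverseLoopA x1 0
  let y1 := if !negative then y else -y
  if y1 > 2 ^ 31 - 1 ∨ y1 < -(2 ^ 31) then 0 else y1

-- ===== PORT B =====
def reverse_alt (x : Int) : Int :=
  let s := (PySem.Int.toChars |x|).reverse   -- str(abs(x))[::-1]
  let y := s.foldl (fun y c => y * 10 + ((c.toNat : Int) - 48)) 0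
  let y1 := if x < 0 then -y else y
  if y1 > 2 ^ 31 - 1 ∨ y1 < -(2 ^ 31) then 0 else y1

-- ===== PRECONDITION & SPEC =====
def Spec_reverse (x : Int) (out : Int) : Prop := out = reverse_alt x
instance (x : Int) (out : Int) : Decidable (Spec_reverse x out) := by unfold Spec_reverse; infer_instance

-- ===== CLAIM (what is proved, stated in full; the proofs are below) =====
def Claim_equal_reverse : Prop := ∀ (x : Int), Dom_reverse x → Spec_reverse x (reverse x)

-- ===== LEMMAS AND PROOFS =====

-- A's loop is Horner over Nat.digits (least-significant first)
theorem reverseLoopA_eq_digits (n : Nat) : ∀ y : Int,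
    reverseLoopA (n : Int) y = (Nat.digits 10 n).foldl (fun a d => a * 10 + (d : Int)) y := by
  induction n using Nat.strong_induction_on with
  | _ n ih =>
    intro y
    rw [reverseLoopA]
    by_cases hn : 0 < n
    · have hpos : ((n : Int) > 0) := by exact_mod_cast hn
      rw [dif_pos hpos]
      have hfd : PySem.Int.floordiv (n : Int) 10 = ((n / 10 : Nat) : Int) := by
        rw [PySem.Int.floordiv_eq_ediv_of_pos (by omega)]
        exact_mod_cast (Int.natCast_div n 10).symm
      have hmd : PySem.Int.mod (n : Int) 10 = ((n % 10 : Nat) : Int) := by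
        simp [PySem.Int.mod, Int.fmod_eq_emod, Int.natCast_emod]
      rw [hfd, hmd, ih (n / 10) (Nat.div_lt_self hn (by norm_num)),
          Nat.digits_def' (by norm_num : (1:Nat) < 10) hn]
      simp
    · have h0 : n = 0 := by omega
      subst h0
      simp

-- core's toDigitsCore equals the reversed digitChar image of Nat.digits, given enough fuel
theorem toDigitsCore_eq (f : Nat) : ∀ (n : Nat) (ds : List Char), 0 < n → n < 10 ^ f →
    Nat.toDigitsCore 10 f n ds = ((Nat.digits 10 n).map Nat.digitChar).reverse ++ ds := by
  induction f with
  | zero => intro n ds h1 h2; omega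
  | succ f ih =>
    intro n ds h1 h2
    rw [Nat.toDigitsCore]
    by_cases hq : n / 10 = 0
    · have hlt : n < 10 := by omega
      rw [if_pos hq, Nat.digits_def' (by norm_num : (1:Nat) < 10) h1, hq]
      simp [Nat.mod_eq_of_lt hlt]
    · rw [if_neg hq, ih (n / 10) _ (by omega) (by omega),
          Nat.digits_def' (by norm_num : (1:Nat) < 10) h1]
      simp

theorem toDigits_eq (n : Nat) (h : 0 < n) :
    Nat.toDigits 10 n = ((Nat.digits 10 n).map Nat.digitChar).reverse := by
  have hlt : n < 10 ^ (n + 1) :=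
    lt_of_lt_of_le (Nat.lt_pow_self (by norm_num)) (Nat.pow_le_pow_right (by norm_num) (Nat.le_succ n))
  rw [Nat.toDigits, toDigitsCore_eq (n + 1) n [] h hlt, List.append_nil]

-- decoding a digitChar back to its digit
theorem digitChar_toNat (d : Nat) (h : d < 10) : ((Nat.digitChar d).toNat : Int) - 48 = d := by
  interval_cases d <;> decide

-- B's char fold over the digitChar image is the same Horner fold
theorem fold_map_digitChar (l : List Nat) (hl : ∀ d ∈ l, d < 10) : ∀ y : Int,
    (l.map Nat.digitChar).foldl (fun y c => y * 10 + ((c.toNat : Int) - 48)) y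
      = l.foldl (fun a d => a * 10 + (d : Int)) y := by
  induction l with
  | nil => intro y; rfl
  | cons d t ih =>
    intro y
    simp only [List.map_cons, List.foldl_cons]
    rw [digitChar_toNat d (hl d (List.mem_cons_self ..))]
    exact ih (fun e he => hl e (List.mem_cons_of_mem _ he)) _

theorem core_eq (n : Nat) :
    reverseLoopA (n : Int) 0
      = ((PySem.Int.toChars (n : Int)).reverse).foldl (fun y c => y * 10 + ((c.toNat : Int) - 48)) 0 := by
  have htc : PySem.Int.toChars (n : Int) = Nat.toDigits 10 n := by
    simp [PySem.Int.toChars]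
  rw [htc, reverseLoopA_eq_digits]
  by_cases h : 0 < n
  · rw [toDigits_eq n h, List.reverse_reverse,
        fold_map_digitChar _ (fun d hd => Nat.digits_lt_base (by norm_num) hd)]
  · have h0 : n = 0 := by omega
    subst h0
    decide

-- ===== VERDICT (by name: the statement is the Claim_ definition above) =====
theorem reverse_spec : Claim_equal_reverse := by
  intro x _
  simp only [Spec_reverse, reverse, reverse_alt, Int.abs_eq_natAbs, core_eq x.natAbs]
  by_cases hneg : x < 0 <;> simp [hneg]
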